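-- pv_equiv track=rewrite | github.com/mrazali/Network-Security | Des_encryption.py | bin32
-- ===== SOURCE A (Python) =====
-- def dec2bin(x):
--     if x == 0: return [0]
--     bit = []
--     while x:
--         bit.append(x % 2)
--         x >>= 1
--     return bit[::-1]
--
-- def bin32(ary):
--     bin32 =[]
--     for i in ary:
--         a = dec2bin(i)
--         l = len(a)
--         b = 4-l
--         for i in range(0,b):
--             bin32.append(0)
--         for i in a:
--             bin32.append(i)
--     return bin32
-- ===== SOURCE B (Python) =====
-- def bin32(ary):
--     out = []
--     for i in ary:
--         w = max(4, i.bit_length())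
--         for p in reversed(range(w)):
--             out.append((i >> p) & 1)
--     return out
-- ===== Notes on version B (the rewrite author's own statement) =====
-- stated objective: simpler
-- what changed: B replaces A's build-LSB-list/reverse/length/pad-loop pipeline with direct positional bit extraction: for each value it emits (i >> p) & 1 for p from max(4, bit_length)-1 down to 0, so the reverse step and the separate zero-padding loop disappear.
-- outside the precondition, e.g. on bin32([-1]): A does not finish within the time limit, B returns [1, 1, 1, 1]
import Mathlib
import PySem

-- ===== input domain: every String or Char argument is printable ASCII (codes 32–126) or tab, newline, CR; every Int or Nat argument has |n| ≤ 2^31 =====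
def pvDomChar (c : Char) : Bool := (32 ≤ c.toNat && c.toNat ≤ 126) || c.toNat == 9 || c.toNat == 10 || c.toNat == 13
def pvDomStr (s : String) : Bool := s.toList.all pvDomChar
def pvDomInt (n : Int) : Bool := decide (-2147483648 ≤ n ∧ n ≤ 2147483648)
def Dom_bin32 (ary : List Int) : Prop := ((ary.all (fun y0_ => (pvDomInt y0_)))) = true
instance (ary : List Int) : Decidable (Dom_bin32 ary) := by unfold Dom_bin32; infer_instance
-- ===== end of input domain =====

-- B emits each value's bits positionally ((i >> p) & 1, p from max(4, bit_length)-1 down to 0),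
-- replacing A's build-LSB-list / reverse / pad-with-zeros pipeline. Same return value on Pre_.

-- ===== PORT A =====
-- Python 'while x': for x < 0 the Python loop never terminates (excluded by Pre_);
-- starting from x > 0 the loop exits exactly when x reaches 0, so the guard 'x ≤ 0' is exact there.
def dec2binLoop (x : Int) (bit : List Int) : List Int :=
  if x ≤ 0 then bit
  else dec2binLoop (PySem.Int.floordiv x 2) (bit ++ [PySem.Int.mod x 2])
termination_by x.toNat
decreasing_by
  rw [PySem.Int.floordiv_eq_ediv_of_pos (by omega)]
  omega

def dec2bin (x : Int) : List Int :=
  if x = 0 then [0] else (dec2binLoop x []).reverse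

def bin32 (ary : List Int) : List Int :=
  ary.foldl (fun acc i =>
    let a := dec2bin i
    let l : Int := a.length
    let b := 4 - l
    let acc1 := (PySem.List.pyRange 0 b 1).foldl (fun acc _ => acc ++ [(0 : Int)]) acc
    a.foldl (fun acc j => acc ++ [j]) acc1) []

-- ===== PORT B =====
def bin32_alt (ary : List Int) : List Int :=
  ary.foldl (fun acc i =>
    let w := max 4 (PySem.Int.bitLength i)
    acc ++ (List.range w).reverse.map (fun p : Nat => PySem.Int.band (i >>> p) 1)) []

-- ===== PRECONDITION & SPEC =====
-- Pre_ excludes negative elements: Python A's 'while x' never terminates for x < 0.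
def Pre_bin32 (ary : List Int) : Prop := ∀ x ∈ ary, 0 ≤ x
instance (ary : List Int) : Decidable (Pre_bin32 ary) := by unfold Pre_bin32; infer_instance
def pvWitness_bin32 : List Int := [0, 5, 16, 255]

def Spec_bin32 (ary : List Int) (out : List Int) : Prop := out = bin32_alt ary
instance (ary : List Int) (out : List Int) : Decidable (Spec_bin32 ary out) := by unfold Spec_bin32; infer_instance

-- ===== CLAIM (what is proved, stated in full; the proofs are below) =====
def Claim_equal_bin32 : Prop := ∀ (ary : List Int), Dom_bin32 ary → Pre_bin32 ary → Spec_bin32 ary (bin32 ary)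

-- ===== LEMMAS AND PROOFS =====

-- cast a Nat list to Int (kept as a named helper so rewrite patterns stay stable)
def castL : List Nat → List Int := List.map (fun m : Nat => (m : Int))

-- LSB-first binary digits of a natural number (A's loop state, abstracted to Nat)
def natBits (n : Nat) : List Nat :=
  if n = 0 then [] else n % 2 :: natBits (n / 2)
decreasing_by exact Nat.div_lt_self (by omega) (by omega)

-- bit length over Nat, the recursion both lengths share
def bitL (n : Nat) : Nat :=
  if n = 0 then 0 else bitL (n / 2) + 1
decreasing_by exact Nat.div_lt_self (by omega) (by omega)

lemma dec2binLoop_natCast (n : Nat) (bit : List Int) :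
    dec2binLoop (n : Int) bit = bit ++ castL (natBits n) := by
  induction n using Nat.strong_induction_on generalizing bit with
  | _ n ih =>
    rw [dec2binLoop, natBits]
    by_cases h : n = 0
    · simp [h, castL]
    · have h2 : ¬ ((n : Int) ≤ 0) := by omega
      rw [if_neg h2, if_neg h]
      have hf : PySem.Int.floordiv (n : Int) 2 = ((n / 2 : Nat) : Int) := by
        exact_mod_cast PySem.Int.floordiv_natCast n 2
      have hm : PySem.Int.mod (n : Int) 2 = ((n % 2 : Nat) : Int) := by
        exact_mod_cast PySem.Int.mod_natCast n 2
      rw [hf, hm, ih (n / 2) (Nat.div_lt_self (by omega) (by omega))]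
      simp [castL]

lemma natBits_length (n : Nat) : (natBits n).length = bitL n := by
  induction n using Nat.strong_induction_on with
  | _ n ih =>
    rw [natBits, bitL]
    by_cases h : n = 0
    · simp [h]
    · rw [if_neg h, if_neg h]
      simp [ih (n / 2) (Nat.div_lt_self (by omega) (by omega))]

lemma bitL_eq (n : Nat) : bitL n = PySem.Int.bitLength (n : Int) := by
  induction n using Nat.strong_induction_on with
  | _ n ih =>
    rw [bitL]
    by_cases h : n = 0
    · simp [h, PySem.Int.bitLength_zero]
    · rw [if_neg h, PySem.Int.bitLength_natCast (show 0 < n by omega)]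
      rw [ih (n / 2) (Nat.div_lt_self (by omega) (by omega))]

lemma natBits_eq_range (n : Nat) :
    natBits n = (List.range (bitL n)).map (fun p => n / 2 ^ p % 2) := by
  induction n using Nat.strong_induction_on with
  | _ n ih =>
    rw [natBits, bitL]
    by_cases h : n = 0
    · simp [h]
    · rw [if_neg h, if_neg h, List.range_succ_eq_map, List.map_cons, List.map_map]
      congr 1
      · simp
      · rw [ih (n / 2) (Nat.div_lt_self (by omega) (by omega))]
        apply List.map_congr_left
        intro p _
        simp [Function.comp, Nat.div_div_eq_div_mul, pow_succ, mul_comm]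

lemma natBits_lt (n : Nat) : n < 2 ^ bitL n := by
  induction n using Nat.strong_induction_on with
  | _ n ih =>
    rw [bitL]
    by_cases h : n = 0
    · simp [h]
    · rw [if_neg h]
      have := ih (n / 2) (Nat.div_lt_self (by omega) (by omega))
      have h2 := Nat.div_add_mod n 2
      simp only [pow_succ]
      omega

lemma natBits_high (n p : Nat) (h : bitL n ≤ p) : n / 2 ^ p % 2 = 0 := by
  have : n < 2 ^ p := lt_of_lt_of_le (natBits_lt n) (Nat.pow_le_pow_right (by omega) h)
  simp [Nat.div_eq_of_lt this]

lemma range_rev_map (n : Nat) : ∀ w, bitL n ≤ w →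
    (List.range w).reverse.map (fun p => n / 2 ^ p % 2)
      = List.replicate (w - bitL n) 0 ++ (natBits n).reverse := by
  intro w
  induction w with
  | zero =>
    intro h
    have h0 : (natBits n).length = 0 := by rw [natBits_length]; omega
    simp [List.eq_nil_of_length_eq_zero h0]
  | succ w ih =>
    intro h
    by_cases he : bitL n = w + 1
    · rw [← he]
      simp only [Nat.sub_self, List.replicate_zero, List.nil_append]
      rw [List.map_reverse, ← natBits_eq_range]
    · have hw : bitL n ≤ w := by omega
      rw [List.range_succ, List.reverse_append, List.reverse_singleton, List.singleton_append,
        List.map_cons, ih hw, natBits_high n w hw]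
      have : w + 1 - bitL n = (w - bitL n) + 1 := by omega
      rw [this, List.replicate_succ]
      simp

lemma foldl_append_zero (xs : List Int) (acc : List Int) :
    xs.foldl (fun a _ => a ++ [(0 : Int)]) acc = acc ++ List.replicate xs.length 0 := by
  induction xs generalizing acc with
  | nil => simp
  | cons x xs ih =>
    rw [List.foldl_cons, ih, List.length_cons, List.replicate_succ, List.append_assoc]
    rfl

lemma foldl_append_self (xs acc : List Int) :
    xs.foldl (fun a j => a ++ [j]) acc = acc ++ xs := by
  induction xs generalizing acc with
  | nil => simp
  | cons x xs ih =>
    rw [List.foldl_cons, ih, List.append_assoc]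
    rfl

lemma band_bit (n p : Nat) :
    PySem.Int.band ((n : Int) >>> p) 1 = ((n / 2 ^ p % 2 : Nat) : Int) := by
  have h1 : ((n : Int) >>> p) = ((n >>> p : Nat) : Int) := by
    simp [Int.natCast_shiftRight]
  rw [h1]
  have h2 : (1 : Int) = ((1 : Nat) : Int) := rfl
  rw [h2, PySem.Int.band_natCast]
  rw [Nat.and_one_is_mod, Nat.shiftRight_eq_div_pow]

lemma elem_eq (n : Nat) (acc : List Int) :
    (dec2bin (n : Int)).foldl (fun a j => a ++ [j])
      ((PySem.List.pyRange 0 (4 - ((dec2bin (n : Int)).length : Int)) 1).foldl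
        (fun a _ => a ++ [(0 : Int)]) acc)
    = acc ++ (List.range (max 4 (PySem.Int.bitLength (n : Int)))).reverse.map
        (fun p : Nat => PySem.Int.band ((n : Int) >>> p) 1) := by
  have hb : ∀ w : Nat, (List.range w).reverse.map (fun p : Nat => PySem.Int.band ((n : Int) >>> p) 1)
      = castL ((List.range w).reverse.map (fun p => n / 2 ^ p % 2)) := by
    intro w
    rw [castL, List.map_map]
    exact List.map_congr_left (fun p _ => band_bit n p)
  rw [foldl_append_zero, foldl_append_self, hb, PySem.List.length_pyRange_one]
  by_cases h0 : n = 0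
  · subst h0
    have hd : dec2bin ((0 : Nat) : Int) = [0] := by simp [dec2bin]
    rw [hd]
    have hbl : PySem.Int.bitLength ((0 : Nat) : Int) = 0 := by
      simp [PySem.Int.bitLength_zero]
    rw [hbl]
    rw [range_rev_map 0 (max 4 0) (by rw [bitL]; simp)]
    have hnb : natBits 0 = [] := by rw [natBits]; simp
    rw [hnb]
    have hb0 : bitL 0 = 0 := by rw [bitL]; rfl
    rw [hb0]
    simp only [castL, List.reverse_nil, List.append_nil, Nat.sub_zero, List.map_replicate,
      Nat.cast_zero]
    norm_num
    decide
  · have hne : ((n : Int)) ≠ 0 := by omega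
    rw [dec2bin, if_neg hne, dec2binLoop_natCast, List.nil_append]
    have hw : bitL n ≤ max 4 (PySem.Int.bitLength (n : Int)) := by
      rw [bitL_eq]; exact le_max_right _ _
    rw [range_rev_map n _ hw]
    have hcount : ((4 : Int) - (((castL (natBits n)).reverse).length : Int) - 0).toNat
        = max 4 (PySem.Int.bitLength (n : Int)) - bitL n := by
      simp only [castL, List.length_reverse, List.length_map, natBits_length]
      rw [← bitL_eq]
      omega
    rw [hcount]
    simp [castL, List.map_reverse, List.map_append, List.map_replicate, List.append_assoc]

lemma fold_eq (ary : List Int) (h : ∀ x ∈ ary, 0 ≤ x) (acc : List Int) :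
    ary.foldl (fun acc i =>
      (dec2bin i).foldl (fun a j => a ++ [j])
        ((PySem.List.pyRange 0 (4 - ((dec2bin i).length : Int)) 1).foldl
          (fun a _ => a ++ [(0 : Int)]) acc)) acc
    = ary.foldl (fun acc i =>
        acc ++ (List.range (max 4 (PySem.Int.bitLength i))).reverse.map
          (fun p : Nat => PySem.Int.band (i >>> p) 1)) acc := by
  induction ary generalizing acc with
  | nil => rfl
  | cons x xs ih =>
    simp only [List.foldl_cons]
    have hx : 0 ≤ x := h x (List.mem_cons_self ..)
    have hxe : x = ((x.toNat : Nat) : Int) := by omega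
    rw [hxe, elem_eq x.toNat acc]
    exact ih (fun y hy => h y (List.mem_cons_of_mem _ hy)) _

-- ===== VERDICT (by name: the statement is the Claim_ definition above) =====
theorem bin32_spec : Claim_equal_bin32 := by
  intro ary _ hpre
  unfold Spec_bin32
  show bin32 ary = bin32_alt ary
  simp only [bin32, bin32_alt]
  exact fold_eq ary hpre []
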